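-- pv_equiv track=rewrite | github.com/zeriouslyzen/icebrg | src/iceburg/optimization/next_model_predictor.py | _predict_next_architecture
-- ===== SOURCE A (Python) =====
-- from typing import Dict, Any, List, Optional, Tuple, Set
--
-- def _predict_next_architecture(
--
--     current_architecture: str,
--     trends: List[Dict[str, Any]],
--     model_type: str
-- ) -> str:
--     """Predict next architecture based on current architecture and trends"""
--
--     # Architecture evolution patterns
--     evolution_paths = {
--         "transformer": "sparse_transformer",
--         "sparse_transformer": "mixture_of_experts",
--         "mixture_of_experts": "neural_architecture_search",
--         "neural_architecture_search": "quantum_neural_networks",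
--         "cnn": "vision_transformer",
--         "vision_transformer": "multimodal_transformer",
--         "rnn": "transformer",
--         "lstm": "transformer"
--     }
--
--     # Check for direct evolution path
--     if current_architecture in evolution_paths:
--         predicted = evolution_paths[current_architecture]
--     else:
--         # Predict based on trends
--         if any("quantum" in trend["technology"].lower() for trend in trends):
--             predicted = "quantum_enhanced_transformer"
--         elif any("spiking" in trend["technology"].lower() for trend in trends):
--             predicted = "spiking_neural_network"
--         elif any("attention" in trend["technology"].lower() for trend in trends):
--             predicted = "efficient_attention_transformer"
--         else:
--             predicted = "enhanced_transformer"
--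
--     return predicted
-- ===== SOURCE B (Python) =====
-- def _predict_next_architecture(
--     current_architecture: str,
--     trends,
--     model_type: str
-- ) -> str:
--     """Predict next architecture based on current architecture and trends"""
--     evolution_paths = {
--         "transformer": "sparse_transformer",
--         "sparse_transformer": "mixture_of_experts",
--         "mixture_of_experts": "neural_architecture_search",
--         "neural_architecture_search": "quantum_neural_networks",
--         "cnn": "vision_transformer",
--         "vision_transformer": "multimodal_transformer",
--         "rnn": "transformer",
--         "lstm": "transformer",
--     }
--     predicted = evolution_paths.get(current_architecture)
--     if predicted is not None:
--         return predicted
--     # One pass over the trends instead of three any() scans.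
--     found_spiking = False
--     found_attention = False
--     for trend in trends:
--         tech = trend["technology"].lower()
--         if "quantum" in tech:
--             return "quantum_enhanced_transformer"
--         found_spiking = found_spiking or "spiking" in tech
--         found_attention = found_attention or "attention" in tech
--     if found_spiking:
--         return "spiking_neural_network"
--     if found_attention:
--         return "efficient_attention_transformer"
--     return "enhanced_transformer"
-- ===== Notes on version B (the rewrite author's own statement) =====
-- stated objective: simpler
-- what changed: The three separate any() scans over trends (with a fourth implicit default) are merged into a single loop that early-returns on 'quantum' and collects spiking/attention flags, and the membership test + lookup on evolution_paths becomes one .get(); the trends list is traversed once instead of up to three times.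
import Mathlib
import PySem

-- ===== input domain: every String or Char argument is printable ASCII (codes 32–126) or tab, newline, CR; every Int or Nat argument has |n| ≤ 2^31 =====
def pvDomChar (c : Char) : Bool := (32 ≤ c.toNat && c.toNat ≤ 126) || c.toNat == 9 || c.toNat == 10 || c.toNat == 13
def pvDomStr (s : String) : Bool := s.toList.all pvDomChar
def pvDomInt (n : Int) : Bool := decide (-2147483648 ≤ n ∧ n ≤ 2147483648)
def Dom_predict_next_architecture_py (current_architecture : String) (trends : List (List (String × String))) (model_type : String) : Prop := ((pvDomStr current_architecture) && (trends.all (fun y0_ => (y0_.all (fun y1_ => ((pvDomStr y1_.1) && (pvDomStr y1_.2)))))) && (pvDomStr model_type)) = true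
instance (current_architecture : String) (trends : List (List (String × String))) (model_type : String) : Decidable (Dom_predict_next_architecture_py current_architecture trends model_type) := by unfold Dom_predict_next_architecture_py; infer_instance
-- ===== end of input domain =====

-- B merges A's three any() scans over trends into one loop with an early return on 'quantum'
-- and spiking/attention flags, and replaces the 'in'-test + lookup by a single .get (simpler).


-- ===== PORT A =====
-- the evolution_paths dict literal (shared by both ports)
def pvEvolutionPaths : PySem.Dict String String := PySem.Dict.ofList
  [("transformer", "sparse_transformer"),
   ("sparse_transformer", "mixture_of_experts"),
   ("mixture_of_experts", "neural_architecture_search"),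
   ("neural_architecture_search", "quantum_neural_networks"),
   ("cnn", "vision_transformer"),
   ("vision_transformer", "multimodal_transformer"),
   ("rnn", "transformer"),
   ("lstm", "transformer")]

-- "kw" in trend["technology"].lower(); Pre_ excludes the KeyError case, getD "" stands for it
def pvTechHas (kw : String) (t : List (String × String)) : Bool :=
  PySem.Str.isIn kw (PySem.Str.lower (PySem.Dict.getD ⟨t⟩ "technology" ""))

def predict_next_architecture_py (current_architecture : String) (trends : List (List (String × String))) (model_type : String) : String :=
  if PySem.Dict.contains pvEvolutionPaths current_architecture then
    PySem.Dict.getD pvEvolutionPaths current_architecture ""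
  else
    if trends.any (fun t => pvTechHas "quantum" t) then "quantum_enhanced_transformer"
    else if trends.any (fun t => pvTechHas "spiking" t) then "spiking_neural_network"
    else if trends.any (fun t => pvTechHas "attention" t) then "efficient_attention_transformer"
    else "enhanced_transformer"

-- ===== PORT B =====
-- B's single for-loop: early return on quantum, flags for spiking/attention
def pvScanTrends : List (List (String × String)) → Bool → Bool → String
  | [], fs, fa =>
      if fs then "spiking_neural_network"
      else if fa then "efficient_attention_transformer"
      else "enhanced_transformer"
  | t :: rest, fs, fa =>
      if pvTechHas "quantum" t then "quantum_enhanced_transformer"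
      else pvScanTrends rest (fs || pvTechHas "spiking" t) (fa || pvTechHas "attention" t)

def predict_next_architecture_py_alt (current_architecture : String) (trends : List (List (String × String))) (model_type : String) : String :=
  match PySem.Dict.get? pvEvolutionPaths current_architecture with
  | some predicted => predicted
  | none => pvScanTrends trends false false

-- ===== PRECONDITION & SPEC =====
-- Pre_ excludes exactly the inputs on which Python A raises KeyError: current_architecture not
-- in evolution_paths and some trend lacking the "technology" key is reached before any quantum trend.
def Pre_predict_next_architecture_py (current_architecture : String) (trends : List (List (String × String))) (model_type : String) : Prop :=
  current_architecture ∈ ["transformer", "sparse_transformer", "mixture_of_experts",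
    "neural_architecture_search", "cnn", "vision_transformer", "rnn", "lstm"] ∨
  ∀ i ∈ List.range trends.length,
    (PySem.Dict.get? ⟨trends.getD i []⟩ "technology").isSome = true ∨
    ∃ j ∈ List.range i, pvTechHas "quantum" (trends.getD j []) = true
instance (current_architecture : String) (trends : List (List (String × String))) (model_type : String) : Decidable (Pre_predict_next_architecture_py current_architecture trends model_type) := by unfold Pre_predict_next_architecture_py; infer_instance

def pvWitness_predict_next_architecture_py : String × (List (List (String × String))) × String :=
  ("some_arch", [[("technology", "Spiking Hardware")], [("technology", "attention kernels")]], "llm")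

def Spec_predict_next_architecture_py (current_architecture : String) (trends : List (List (String × String))) (model_type : String) (out : String) : Prop := out = predict_next_architecture_py_alt current_architecture trends model_type
instance (current_architecture : String) (trends : List (List (String × String))) (model_type : String) (out : String) : Decidable (Spec_predict_next_architecture_py current_architecture trends model_type out) := by unfold Spec_predict_next_architecture_py; infer_instance

-- ===== CLAIM (what is proved, stated in full; the proofs are below) =====
def Claim_equal_predict_next_architecture_py : Prop := ∀ (current_architecture : String) (trends : List (List (String × String))) (model_type : String), Dom_predict_next_architecture_py current_architecture trends model_type → Pre_predict_next_architecture_py current_architecture trends model_type → Spec_predict_next_architecture_py current_architecture trends model_type (predict_next_architecture_py current_architecture trends model_type)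

-- ===== LEMMAS AND PROOFS =====
-- B's loop, with pending flags fs/fa, computes A's three-scan cascade
theorem pvScanTrends_eq (ts : List (List (String × String))) (fs fa : Bool) :
    pvScanTrends ts fs fa =
      if ts.any (fun t => pvTechHas "quantum" t) then "quantum_enhanced_transformer"
      else if fs || ts.any (fun t => pvTechHas "spiking" t) then "spiking_neural_network"
      else if fa || ts.any (fun t => pvTechHas "attention" t) then "efficient_attention_transformer"
      else "enhanced_transformer" := by
  induction ts generalizing fs fa with
  | nil => simp [pvScanTrends]
  | cons t rest ih =>
      simp only [pvScanTrends, List.any_cons, ih, Bool.or_assoc]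
      by_cases hq : pvTechHas "quantum" t = true <;> simp [hq]

-- ===== VERDICT (by name: the statement is the Claim_ definition above) =====
theorem predict_next_architecture_py_spec : Claim_equal_predict_next_architecture_py := by
  intro ca trends mt _ _
  unfold Spec_predict_next_architecture_py predict_next_architecture_py predict_next_architecture_py_alt
  rw [pvScanTrends_eq]
  rw [PySem.Dict.contains_eq_isSome_get?, PySem.Dict.getD_eq_get?_getD]
  cases PySem.Dict.get? pvEvolutionPaths ca <;> simp
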